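-- pv_equiv track=rewrite | github.com/njh0317/ProblemSolving | Week 5/PGS_82612_Suhyun.py | solution
-- ===== SOURCE A (Python) =====
-- def solution(price, money, count):
--     new_p = 0
--     price_n = 0
--
--     for i in range(1, count+1):
--         price_n = price * i
--         new_p += price_n
--
--     if money < new_p:
--         answer = new_p - money
--     else:
--         answer = 0
--
--     return answer
-- ===== SOURCE B (Python) =====
-- def solution(price, money, count):
--     n = count if count > 0 else 0
--     total = price * n * (n + 1) // 2
--     shortfall = total - money
--     return shortfall if shortfall > 0 else 0
-- ===== Notes on version B (the rewrite author's own statement) =====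
-- stated objective: faster
-- what changed: Replaces the O(count) accumulation loop by the arithmetic-series closed form price*n*(n+1)//2 and a max-with-0.
import Mathlib
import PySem

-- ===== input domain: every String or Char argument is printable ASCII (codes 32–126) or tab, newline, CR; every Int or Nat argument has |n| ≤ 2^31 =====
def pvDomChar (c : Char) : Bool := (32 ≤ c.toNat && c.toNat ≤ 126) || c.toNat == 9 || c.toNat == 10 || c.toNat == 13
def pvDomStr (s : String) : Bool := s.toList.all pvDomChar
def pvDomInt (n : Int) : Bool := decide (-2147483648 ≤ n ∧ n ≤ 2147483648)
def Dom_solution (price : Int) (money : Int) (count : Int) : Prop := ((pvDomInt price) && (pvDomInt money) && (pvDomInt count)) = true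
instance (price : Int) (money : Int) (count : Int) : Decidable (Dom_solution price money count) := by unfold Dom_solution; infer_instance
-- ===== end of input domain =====

-- B replaces A's O(count) accumulation loop by the closed form price*n*(n+1)//2 (objective: faster).

-- ===== PORT A =====
def solution (price : Int) (money : Int) (count : Int) : Int :=
  -- new_p, price_n accumulated over range(1, count+1)
  let st := (PySem.List.pyRange 1 (count + 1) 1).foldl
    (fun (s : Int × Int) i =>
      let price_n := price * i
      (s.1 + price_n, price_n)) (0, 0)
  let new_p := st.1
  if money < new_p then new_p - money else 0

-- ===== PORT B =====
def solution_alt (price : Int) (money : Int) (count : Int) : Int :=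
  let n := if count > 0 then count else 0
  let total := PySem.Int.floordiv (price * n * (n + 1)) 2
  let shortfall := total - money
  if shortfall > 0 then shortfall else 0

-- ===== PRECONDITION & SPEC =====
def Spec_solution (price : Int) (money : Int) (count : Int) (out : Int) : Prop := out = solution_alt price money count
instance (price : Int) (money : Int) (count : Int) (out : Int) : Decidable (Spec_solution price money count out) := by unfold Spec_solution; infer_instance

-- ===== CLAIM (what is proved, stated in full; the proofs are below) =====
def Claim_equal_solution : Prop := ∀ (price : Int) (money : Int) (count : Int), Dom_solution price money count → Spec_solution price money count (solution price money count)

-- ===== LEMMAS AND PROOFS =====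

-- the first component of A's fold, doubled, is price*k*(k+1)
theorem solutionA_fold_sum (price : Int) : ∀ (k : Nat) (a b : Int),
    (((PySem.List.pyRange 1 ((k : Int) + 1) 1).foldl
      (fun (s : Int × Int) i =>
        let price_n := price * i
        (s.1 + price_n, price_n)) (a, b)).1) * 2 = a * 2 + price * k * (k + 1) := by
  intro k
  induction k with
  | zero =>
    intro a b
    rw [PySem.List.pyRange_one_eq_nil (by norm_num)]
    simp
  | succ n ih =>
    intro a b
    have h : ((n + 1 : Nat) : Int) + 1 = ((n : Int) + 1) + 1 := by push_cast; ring
    rw [h, PySem.List.pyRange_one_succ_right (by push_cast; omega), List.foldl_append]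
    simp only [List.foldl_cons, List.foldl_nil]
    have := ih a b
    push_cast
    push_cast at this
    nlinarith [this]

-- ===== VERDICT (by name: the statement is the Claim_ definition above) =====
theorem solution_spec : Claim_equal_solution := by
  intro price money count _
  unfold Spec_solution solution solution_alt
  by_cases hc : count > 0
  · simp only [hc, if_pos]
    set st := (PySem.List.pyRange 1 (count + 1) 1).foldl
      (fun (s : Int × Int) i =>
        let price_n := price * i
        (s.1 + price_n, price_n)) ((0 : Int), (0 : Int)) with hst
    have hk : ((count.toNat : Int)) = count := Int.toNat_of_nonneg (by omega)
    have hsum : st.1 * 2 = 0 * 2 + price * count * (count + 1) := by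
      rw [hst, ← hk]
      exact solutionA_fold_sum price count.toNat 0 0
    have htot : PySem.Int.floordiv (price * count * (count + 1)) 2 = st.1 := by
      rw [PySem.Int.floordiv_eq_ediv_of_pos (by norm_num)]
      have : price * count * (count + 1) = st.1 * 2 := by omega
      rw [this, Int.mul_ediv_cancel _ (by norm_num)]
    rw [htot]
    split_ifs <;> omega
  · have hnil : PySem.List.pyRange 1 (count + 1) 1 = [] :=
      PySem.List.pyRange_one_eq_nil (by omega)
    rw [hnil]
    simp only [List.foldl_nil]
    have h0 : PySem.Int.floordiv (price * 0 * (0 + 1)) 2 = 0 := by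
      rw [PySem.Int.floordiv_eq_ediv_of_pos (by norm_num)]; simp
    simp only [if_neg hc, h0, Prod.fst]
    split_ifs <;> omega
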